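-- pv_equiv track=rewrite | github.com/stolniceanudenisa/Python-Algorithms-and-Programming | Seminare/exercitii/tema_lab_9_10.py | cea_mai_lunga_nr_consec
-- ===== SOURCE A (Python) =====
-- def sir_crescator(lst):
--     '''
--     Verifica daca un sir este crescator.
--     :param: lst - Lista de numere
--     :return: True daca sirul este crescator, fals in caz contrar.
--     '''
--     for i in range(len(lst)-1):
--         if lst[i+1] < lst[i]:
--             return False
--     return True
--
-- def sir_descrescator(lst):
--     '''
--     Verifica daca un sir este descrescator.
--     :param: lst - Lista de numere
--     :return: True daca sirul este descrescator, fals in caz contrar.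
--     '''
--     for i in range(len(lst)-1):
--         if lst[i] < lst[i+1]:
--             return False
--     return True
--
-- def egale(x, y):
--     """
--     Determina daca doua elemente sunt egale.
--     :param Cele doua elemente:
--     :return True daca elementele sunt egale, False in caz contrar:
--     """
--     if x == y:
--         return True
--     return False
--
-- def verifegale(lst):
--     """
--     Determina daca numerele din lista au valori egale 3 cate 3
--     :param lst:
--     :return True sau False:
--     """
--     if len(lst) > 1:
--         for i in range(0, len(lst) - 2):
--             if egale(lst[i],lst[i+1]) == egale(lst[i+1],lst[i+2]) == egale(lst[i],lst[i+2]):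
--                 return False
--     return True
--
-- def cea_mai_lunga_nr_consec(lst):
--     """
--     Determina cea mai lunga subsecventa de numere in care in oricare trei elemente consecutive exista o valoare care se repeta.
--     :param lst - lista de numere:
--     :return lista cu cea mai lunga subsecventa cu proprietatea ceruta:
--     """
--     subsecventaMax2 = []
--     if sir_crescator(lst) == True or  sir_descrescator(lst) == True:
--         return subsecventaMax2
--     for i in range(len(lst)):
--         for j in range(len(lst)):
--             if verifegale(lst[i:j + 1]) and len(lst[i:j + 1]) > len(subsecventaMax2):
--                 subsecventaMax2 = lst[i:j + 1]
--     return subsecventaMax2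
-- ===== SOURCE B (Python) =====
-- def cea_mai_lunga_nr_consec(lst):
--     """
--     Determina cea mai lunga subsecventa de numere in care in oricare trei elemente consecutive exista o valoare care se repeta.
--     Single linear scan over the triples: split the list at 'bad' triples (all three
--     equal or all three distinct) and keep the first longest run between them.
--     :param lst - lista de numere:
--     :return lista cu cea mai lunga subsecventa cu proprietatea ceruta:
--     """
--     if all(x <= y for x, y in zip(lst, lst[1:])) or all(x >= y for x, y in zip(lst, lst[1:])):
--         return []
--     n = len(lst)
--     best_s, best_len, s = 0, 0, 0
--     for i, (a, b, c) in enumerate(zip(lst, lst[1:], lst[2:])):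
--         if (a == b) == (b == c) == (a == c):  # bad triple: run [s, i+2) ends here
--             if i + 2 - s > best_len:
--                 best_s, best_len = s, i + 2 - s
--             s = i + 1  # next run may start one past the triple's first element
--     if n - s > best_len:
--         best_s, best_len = s, n - s
--     return lst[best_s:best_s + best_len]
-- ===== Notes on version B (the rewrite author's own statement) =====
-- stated objective: faster
-- what changed: A tries all O(n^2) slices lst[i:j+1] and re-verifies each slice's triples from scratch (O(n^3) overall after the slice copies); B makes one linear pass over consecutive triples, splitting the list at 'bad' triples (all three elements equal or all three distinct) and keeping the first longest run between them, returning a single final slice.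
import Mathlib
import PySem

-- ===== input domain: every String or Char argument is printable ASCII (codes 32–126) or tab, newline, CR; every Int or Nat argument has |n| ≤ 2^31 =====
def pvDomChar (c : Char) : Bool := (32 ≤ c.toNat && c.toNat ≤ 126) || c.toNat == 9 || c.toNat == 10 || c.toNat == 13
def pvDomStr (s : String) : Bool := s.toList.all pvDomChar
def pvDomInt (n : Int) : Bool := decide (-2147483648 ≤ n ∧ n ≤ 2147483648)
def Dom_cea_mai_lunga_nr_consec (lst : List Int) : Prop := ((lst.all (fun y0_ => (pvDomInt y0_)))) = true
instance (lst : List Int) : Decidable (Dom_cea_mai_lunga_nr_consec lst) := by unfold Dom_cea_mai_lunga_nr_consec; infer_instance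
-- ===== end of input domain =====

-- B replaces A's scan of all O(n^2) slices (each re-verified from scratch) by one linear pass
-- that splits the list at "bad" triples and keeps the first longest run between them.

-- ===== PORT A =====
def sir_crescator (lst : List Int) : Bool :=
  -- for i in range(len(lst)-1): if lst[i+1] < lst[i]: return False / return True
  (PySem.List.pyRange 0 (PySem.List.len lst - 1) 1).all fun i =>
    !(decide (PySem.List.pyGetD lst (i + 1) 0 < PySem.List.pyGetD lst i 0))

def sir_descrescator (lst : List Int) : Bool :=
  (PySem.List.pyRange 0 (PySem.List.len lst - 1) 1).all fun i =>
    !(decide (PySem.List.pyGetD lst i 0 < PySem.List.pyGetD lst (i + 1) 0))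

def egale (x y : Int) : Bool :=
  if x == y then true else false

def verifegale (lst : List Int) : Bool :=
  if PySem.List.len lst > 1 then
    -- for i in range(0, len(lst)-2): if egale(lst[i],lst[i+1]) == egale(lst[i+1],lst[i+2]) == egale(lst[i],lst[i+2]): return False
    (PySem.List.pyRange 0 (PySem.List.len lst - 2) 1).all fun i =>
      !((egale (PySem.List.pyGetD lst i 0) (PySem.List.pyGetD lst (i + 1) 0) ==
           egale (PySem.List.pyGetD lst (i + 1) 0) (PySem.List.pyGetD lst (i + 2) 0)) &&
        (egale (PySem.List.pyGetD lst (i + 1) 0) (PySem.List.pyGetD lst (i + 2) 0) ==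
           egale (PySem.List.pyGetD lst i 0) (PySem.List.pyGetD lst (i + 2) 0)))
  else true

-- body of A's inner j-loop: sub = lst[i:j+1]; keep it when valid and strictly longer
def stepA (lst : List Int) (i : Int) (best : List Int) (j : Int) : List Int :=
  let sub := PySem.List.slice lst (some i) (some (j + 1))
  if verifegale sub && decide (PySem.List.len sub > PySem.List.len best) then sub else best

def cea_mai_lunga_nr_consec (lst : List Int) : List Int :=
  if (sir_crescator lst == true) || (sir_descrescator lst == true) then []
  else
    (PySem.List.pyRange 0 (PySem.List.len lst) 1).foldl
      (fun best i => (PySem.List.pyRange 0 (PySem.List.len lst) 1).foldl (stepA lst i) best)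
      []

-- ===== PORT B =====
-- all(x <= y for x, y in zip(lst, lst[1:]))
def ascAll (lst : List Int) : Bool :=
  (lst.zip (PySem.List.slice lst (some 1) none)).all fun p => decide (p.1 ≤ p.2)

def descAll (lst : List Int) : Bool :=
  (lst.zip (PySem.List.slice lst (some 1) none)).all fun p => decide (p.1 ≥ p.2)

-- loop body: state (best_s, best_len, s), element (i, (a, (b, c)))
def stepB (st : Int × Int × Int) (q : Int × Int × Int × Int) : Int × Int × Int :=
  if ((q.2.1 == q.2.2.1) == (q.2.2.1 == q.2.2.2)) && ((q.2.2.1 == q.2.2.2) == (q.2.1 == q.2.2.2)) then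
    if q.1 + 2 - st.2.2 > st.2.1 then (st.2.2, q.1 + 2 - st.2.2, q.1 + 1) else (st.1, st.2.1, q.1 + 1)
  else st

def cea_mai_lunga_nr_consec_alt (lst : List Int) : List Int :=
  if ascAll lst || descAll lst then []
  else
    let n := PySem.List.len lst
    -- for i, (a, b, c) in enumerate(zip(lst, lst[1:], lst[2:])):
    let st := (PySem.List.enumerate
        (lst.zip ((PySem.List.slice lst (some 1) none).zip (PySem.List.slice lst (some 2) none))) 0).foldl
        stepB (0, 0, 0)
    let fin := if n - st.2.2 > st.2.1 then (st.2.2, n - st.2.2) else (st.1, st.2.1)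
    PySem.List.slice lst (some fin.1) (some (fin.1 + fin.2))

-- ===== PRECONDITION & SPEC =====
def Spec_cea_mai_lunga_nr_consec (lst : List Int) (out : List Int) : Prop := out = cea_mai_lunga_nr_consec_alt lst
instance (lst : List Int) (out : List Int) : Decidable (Spec_cea_mai_lunga_nr_consec lst out) := by unfold Spec_cea_mai_lunga_nr_consec; infer_instance

-- ===== CLAIM (what is proved, stated in full; the proofs are below) =====
def Claim_equal_cea_mai_lunga_nr_consec : Prop := ∀ (lst : List Int), Dom_cea_mai_lunga_nr_consec lst → Spec_cea_mai_lunga_nr_consec lst (cea_mai_lunga_nr_consec lst)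

-- ===== LEMMAS AND PROOFS =====

theorem egale_eq (x y : Int) : egale x y = (x == y) := by
  unfold egale; split <;> simp_all

-- the "bad triple" test: all three pairwise-equality results coincide
def bad3 (a b c : Int) : Bool := ((a == b) == (b == c)) && ((b == c) == (a == c))

def badAt (lst : List Int) (t : ℕ) : Bool :=
  bad3 (lst.getD t 0) (lst.getD (t + 1) 0) (lst.getD (t + 2) 0)

def goodB : List Int → Bool
  | a :: b :: c :: t => !bad3 a b c && goodB (b :: c :: t)
  | _ => true

-- length of the longest prefix in which every consecutive triple is "good"
def mlen : List Int → ℕ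
  | a :: b :: c :: t => if bad3 a b c then 2 else mlen (b :: c :: t) + 1
  | [] => 0
  | [_] => 1
  | [_, _] => 2

theorem mlen_le (xs : List Int) : mlen xs ≤ xs.length := by
  induction xs with
  | nil => simp [mlen]
  | cons a tail ih =>
    match tail with
    | [] => simp [mlen]
    | [b] => simp [mlen]
    | b :: c :: t =>
      simp only [mlen]
      split
      · simp only [List.length_cons]; omega
      · simp only [List.length_cons] at *; omega

theorem mlen_pos (xs : List Int) (h : xs ≠ []) : 0 < mlen xs := by
  match xs with
  | [a] => simp [mlen]
  | [a, b] => simp [mlen]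
  | a :: b :: c :: t => simp only [mlen]; split <;> omega

theorem mlen_short (xs : List Int) (h : xs.length ≤ 2) : mlen xs = xs.length := by
  match xs with
  | [] => rfl
  | [a] => rfl
  | [a, b] => rfl
  | a :: b :: c :: t => simp at h

theorem mlen_ge2 (a b c : Int) (t : List Int) : 2 ≤ mlen (a :: b :: c :: t) := by
  have := mlen_pos (b :: c :: t) (by simp)
  simp only [mlen]; split <;> omega

theorem mlen_take (xs : List Int) : ∀ k : ℕ, mlen (xs.take k) = min k (mlen xs) := by
  induction xs with
  | nil => intro k; simp [mlen]
  | cons a tail ih =>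
    intro k
    match tail with
    | [] =>
      match k with
      | 0 => rfl
      | k + 1 =>
        have h1 : mlen ((a :: ([] : List Int)).take (k + 1)) = 1 := by simp [mlen]
        have h2 : mlen [a] = 1 := rfl
        omega
    | [b] =>
      match k with
      | 0 => rfl
      | 1 =>
        have h1 : mlen ([a, b].take 1) = 1 := rfl
        have h2 : mlen [a, b] = 2 := rfl
        omega
      | k + 2 =>
        have h1 : mlen ([a, b].take (k + 2)) = 2 := by simp [mlen]
        have h2 : mlen [a, b] = 2 := rfl
        omega
    | b :: c :: t =>
      match k with
      | 0 =>
        have h2 := mlen_ge2 a b c t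
        have h1 : mlen ((a :: b :: c :: t).take 0) = 0 := rfl
        omega
      | 1 =>
        have h1 : mlen ((a :: b :: c :: t).take 1) = 1 := rfl
        have h2 := mlen_ge2 a b c t
        omega
      | 2 =>
        have h1 : mlen ((a :: b :: c :: t).take 2) = 2 := rfl
        have h2 := mlen_ge2 a b c t
        omega
      | k + 3 =>
        have htail := ih (k + 2)
        have e2 : (b :: c :: t).take (k + 2) = b :: c :: t.take k := rfl
        rw [e2] at htail
        rw [show (a :: b :: c :: t).take (k + 3) = a :: b :: c :: t.take k from rfl]
        cases hb : bad3 a b c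
        · have g1 : mlen (a :: b :: c :: t.take k) = mlen (b :: c :: t.take k) + 1 := by
            simp [mlen, hb]
          have g2 : mlen (a :: b :: c :: t) = mlen (b :: c :: t) + 1 := by simp [mlen, hb]
          omega
        · have g1 : mlen (a :: b :: c :: t.take k) = 2 := by simp [mlen, hb]
          have g2 : mlen (a :: b :: c :: t) = 2 := by simp [mlen, hb]
          omega

theorem goodB_iff_mlen (xs : List Int) : goodB xs = true ↔ mlen xs = xs.length := by
  induction xs with
  | nil => simp [goodB, mlen]
  | cons a tail ih =>
    match tail with
    | [] => simp [goodB, mlen]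
    | [b] => simp [goodB, mlen]
    | b :: c :: t =>
      have hle := mlen_le (b :: c :: t)
      constructor
      · intro h
        rw [show goodB (a :: b :: c :: t) = (!bad3 a b c && goodB (b :: c :: t)) from rfl,
            Bool.and_eq_true, Bool.not_eq_true'] at h
        obtain ⟨hb, hg⟩ := h
        rw [ih] at hg
        show (if bad3 a b c then 2 else mlen (b :: c :: t) + 1) = (a :: b :: c :: t).length
        rw [if_neg (by simp [hb])]
        simp only [List.length_cons] at hg ⊢
        omega
      · intro h
        show (!bad3 a b c && goodB (b :: c :: t)) = true
        rw [show mlen (a :: b :: c :: t) = (if bad3 a b c then 2 else mlen (b :: c :: t) + 1)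
              from rfl] at h
        by_cases hb : bad3 a b c = true
        · rw [if_pos hb] at h
          exfalso
          simp only [List.length_cons] at h
          omega
        · have hb' : bad3 a b c = false := by simpa using hb
          rw [if_neg (by simp [hb'])] at h
          rw [Bool.and_eq_true, Bool.not_eq_true']
          refine ⟨hb', ?_⟩
          rw [ih]
          simp only [List.length_cons] at h ⊢
          omega

theorem goodB_iff_badAt (xs : List Int) :
    goodB xs = true ↔ ∀ k, k + 2 < xs.length → badAt xs k = false := by
  induction xs with
  | nil => simp [goodB]
  | cons a tail ih =>
    match tail with
    | [] => simp [goodB]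
    | [b] => simp [goodB]
    | b :: c :: t =>
      simp only [goodB, Bool.and_eq_true, Bool.not_eq_true', ih, List.length_cons]
      constructor
      · rintro ⟨hb, hg⟩ k hk
        match k with
        | 0 => simpa [badAt] using hb
        | k + 1 =>
          have := hg k (by omega)
          simpa [badAt] using this
      · intro h
        refine ⟨by simpa [badAt] using h 0 (by omega), fun k hk => ?_⟩
        have := h (k + 1) (by omega)
        simpa [badAt] using this

theorem verif_iff_badAt (xs : List Int) :
    verifegale xs = true ↔ ∀ k, k + 2 < xs.length → badAt xs k = false := by
  unfold verifegale
  rcases Nat.lt_or_ge 1 xs.length with h | h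
  swap
  · rw [if_neg (by simp [PySem.List.len_eq]; omega)]
    simp only [true_iff]
    intro k hk
    exact absurd hk (by omega)
  · rw [if_pos (by simp [PySem.List.len_eq]; omega), List.all_eq_true]
    constructor
    · intro H k hk
      have hm : (↑k : Int) ∈ PySem.List.pyRange 0 (PySem.List.len xs - 2) 1 := by
        rw [PySem.List.mem_pyRange_one]
        simp [PySem.List.len_eq]; omega
      have hx := H _ hm
      have e1 : ((↑k : Int) + 1) = ((↑(k + 1) : ℕ) : Int) := by push_cast; ring
      have e2 : ((↑k : Int) + 2) = ((↑(k + 2) : ℕ) : Int) := by push_cast; ring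
      rw [e1, e2] at hx
      simp only [PySem.List.pyGetD_natCast, egale_eq, Bool.not_eq_true'] at hx
      simpa [badAt, bad3] using hx
    · intro H i hi
      rw [PySem.List.mem_pyRange_one] at hi
      simp only [PySem.List.len_eq] at hi
      obtain ⟨h0, h2⟩ := hi
      have hk : i = ((i.toNat : ℕ) : Int) := by omega
      have hlt : i.toNat + 2 < xs.length := by omega
      have hx := H i.toNat hlt
      rw [hk]
      have e1 : (((i.toNat : ℕ) : Int) + 1) = ((↑(i.toNat + 1) : ℕ) : Int) := by push_cast; ring
      have e2 : (((i.toNat : ℕ) : Int) + 2) = ((↑(i.toNat + 2) : ℕ) : Int) := by push_cast; ring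
      rw [e1, e2]
      simp only [PySem.List.pyGetD_natCast, egale_eq, Bool.not_eq_true']
      simpa [badAt, bad3] using hx

theorem verif_iff_mlen (xs : List Int) : verifegale xs = true ↔ mlen xs = xs.length := by
  rw [verif_iff_badAt, ← goodB_iff_badAt, goodB_iff_mlen]

theorem zipAdj_iff (f : Int × Int → Bool) :
    ∀ xs : List Int, ((xs.zip (xs.drop 1)).all f) = true ↔
      ∀ k, k + 1 < xs.length → f (xs.getD k 0, xs.getD (k + 1) 0) = true := by
  intro xs
  induction xs with
  | nil => simp
  | cons a tail ih =>
    match tail with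
    | [] => simp
    | b :: t =>
      simp only [List.drop_succ_cons, List.drop_zero] at ih ⊢
      simp only [List.zip_cons_cons, List.all_cons, Bool.and_eq_true, ih, List.length_cons]
      constructor
      · rintro ⟨h0, h⟩ k hk
        match k with
        | 0 => simpa using h0
        | k + 1 => simpa using h k (by omega)
      · intro h
        refine ⟨by simpa using h 0 (by omega), fun k hk => by simpa using h (k + 1) (by omega)⟩

theorem rangeAdj_iff (g : Int → Bool) (xs : List Int) :
    ((PySem.List.pyRange 0 (PySem.List.len xs - 1) 1).all g) = true ↔
      ∀ k : ℕ, k + 1 < xs.length → g ↑k = true := by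
  rw [List.all_eq_true]
  constructor
  · intro H k hk
    exact H _ (by rw [PySem.List.mem_pyRange_one]; simp [PySem.List.len_eq]; omega)
  · intro H i hi
    rw [PySem.List.mem_pyRange_one] at hi
    simp only [PySem.List.len_eq] at hi
    have hk : i = ((i.toNat : ℕ) : Int) := by omega
    rw [hk]
    exact H i.toNat (by omega)

theorem cresc_eq (lst : List Int) : sir_crescator lst = ascAll lst := by
  rw [Bool.eq_iff_iff]
  unfold sir_crescator ascAll
  rw [PySem.List.slice_from_one, ← List.drop_one, rangeAdj_iff, zipAdj_iff]
  constructor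
  · intro H k hk
    have := H k hk
    have e1 : ((↑k : Int) + 1) = ((↑(k + 1) : ℕ) : Int) := by push_cast; ring
    rw [e1] at this
    simp only [PySem.List.pyGetD_natCast, Bool.not_eq_true', decide_eq_false_iff_not, not_lt] at this
    simpa using this
  · intro H k hk
    have := H k hk
    have e1 : ((↑k : Int) + 1) = ((↑(k + 1) : ℕ) : Int) := by push_cast; ring
    rw [e1]
    simp only [PySem.List.pyGetD_natCast, Bool.not_eq_true', decide_eq_false_iff_not, not_lt]
    simpa using this

theorem descresc_eq (lst : List Int) : sir_descrescator lst = descAll lst := by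
  rw [Bool.eq_iff_iff]
  unfold sir_descrescator descAll
  rw [PySem.List.slice_from_one, ← List.drop_one, rangeAdj_iff, zipAdj_iff]
  constructor
  · intro H k hk
    have := H k hk
    have e1 : ((↑k : Int) + 1) = ((↑(k + 1) : ℕ) : Int) := by push_cast; ring
    rw [e1] at this
    simp only [PySem.List.pyGetD_natCast, Bool.not_eq_true', decide_eq_false_iff_not, not_lt] at this
    simp only [ge_iff_le, decide_eq_true_eq]
    simpa using this
  · intro H k hk
    have := H k hk
    have e1 : ((↑k : Int) + 1) = ((↑(k + 1) : ℕ) : Int) := by push_cast; ring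
    rw [e1]
    simp only [PySem.List.pyGetD_natCast, Bool.not_eq_true', decide_eq_false_iff_not, not_lt]
    simp only [ge_iff_le, decide_eq_true_eq] at this
    simpa using this

-- ---- the common reference computation ----
def candN (lst : List Int) (i : ℕ) : List Int := (lst.drop i).take (mlen (lst.drop i))

theorem candN_length (lst : List Int) (i : ℕ) : (candN lst i).length = mlen (lst.drop i) := by
  have h := mlen_le (lst.drop i)
  rw [candN, List.length_take]
  omega

def afold (lst : List Int) (l : ℕ) (b : List Int) : List Int :=
  (PySem.List.pyRange ↑l ↑lst.length 1).foldl
    (fun b i => if b.length < mlen (lst.drop i.toNat) then candN lst i.toNat else b) b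

theorem afold_nil (lst : List Int) (l : ℕ) (b : List Int) (h : lst.length ≤ l) :
    afold lst l b = b := by
  unfold afold
  rw [PySem.List.pyRange_one_eq_nil (by exact_mod_cast h)]
  rfl

theorem afold_step (lst : List Int) (l : ℕ) (b : List Int) (h : l < lst.length) :
    afold lst l b =
      afold lst (l + 1) (if b.length < mlen (lst.drop l) then candN lst l else b) := by
  unfold afold
  rw [PySem.List.pyRange_one_cons (by exact_mod_cast h)]
  simp only [List.foldl_cons, Int.toNat_natCast]
  norm_cast

theorem outSeg (lst : List Int) :
    ∀ (d l : ℕ) (b : List Int), l + d ≤ lst.length →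
      (∀ t, l ≤ t → t < l + d → mlen (lst.drop t) ≤ b.length) →
      afold lst l b = afold lst (l + d) b := by
  intro d
  induction d with
  | zero => intro l b _ _; rfl
  | succ d ih =>
    intro l b hle hno
    rw [afold_step lst l b (by omega),
        if_neg (by rw [Nat.not_lt]; exact hno l le_rfl (by omega))]
    rw [ih (l + 1) b (by omega) (fun t ht1 ht2 => hno t (by omega) (by omega))]
    congr 1
    omega

-- ---- A's inner loop over j, for a fixed i ----
def ifold (lst : List Int) (i : Int) (l : ℕ) (b : List Int) : List Int :=
  (PySem.List.pyRange ↑l ↑lst.length 1).foldl (stepA lst i) b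

theorem stepA_eq (lst : List Int) (i l : ℕ) (b : List Int) :
    stepA lst ↑i b ↑l =
      (if verifegale ((lst.drop i).take (l + 1 - i)) &&
            decide (((lst.drop i).take (l + 1 - i)).length > b.length)
       then (lst.drop i).take (l + 1 - i) else b) := by
  unfold stepA
  have e1 : ((↑l : Int) + 1) = ((↑(l + 1) : ℕ) : Int) := by push_cast; ring
  rw [e1, PySem.List.slice_natCast]
  simp [PySem.List.len_eq]

theorem valid_len_le (y : List Int) (k : ℕ) (h : verifegale (y.take k) = true) :
    (y.take k).length ≤ mlen y := by
  rw [verif_iff_mlen] at h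
  rw [← h, mlen_take]
  exact Nat.min_le_right _ _

theorem innerNoop (lst : List Int) (i : ℕ) :
    ∀ (d l : ℕ) (b : List Int), lst.length ≤ l + d →
      mlen (lst.drop i) ≤ b.length →
      ifold lst ↑i l b = b := by
  intro d
  induction d with
  | zero =>
    intro l b h _
    unfold ifold
    rw [PySem.List.pyRange_one_eq_nil (by exact_mod_cast (by omega : lst.length ≤ l))]
    rfl
  | succ d ih =>
    intro l b h hm
    rcases Nat.lt_or_ge l lst.length with hl | hl
    swap
    · unfold ifold
      rw [PySem.List.pyRange_one_eq_nil (by exact_mod_cast hl)]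
      rfl
    · unfold ifold
      rw [PySem.List.pyRange_one_cons (by exact_mod_cast hl)]
      simp only [List.foldl_cons]
      have hstep : stepA lst ↑i b ↑l = b := by
        rw [stepA_eq]
        split
        · rename_i hcond
          rw [Bool.and_eq_true, decide_eq_true_iff] at hcond
          have h1 := valid_len_le (lst.drop i) (l + 1 - i) hcond.1
          exact absurd hcond.2 (by omega)
        · rfl
      rw [hstep]
      have := ih (l + 1) b (by omega) hm
      unfold ifold at this
      rw [show ((↑l : Int) + 1) = ((↑(l + 1) : ℕ) : Int) by push_cast; ring]
      exact this

theorem innerHit (lst : List Int) (i : ℕ) (hi : i < lst.length) :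
    ∀ (d l : ℕ) (b : List Int), i + mlen (lst.drop i) ≤ l + d →
      b.length < mlen (lst.drop i) → l < i + mlen (lst.drop i) →
      ifold lst ↑i l b = candN lst i := by
  have hne : lst.drop i ≠ [] := by
    simp [List.drop_eq_nil_iff]; omega
  have hpos := mlen_pos _ hne
  have hmle : mlen (lst.drop i) ≤ lst.length - i := by
    have := mlen_le (lst.drop i); simp at this; omega
  intro d
  induction d with
  | zero => intro l b h1 h2 h3; omega
  | succ d ih =>
    intro l b h1 h2 h3
    have hl : l < lst.length := by omega
    unfold ifold
    rw [PySem.List.pyRange_one_cons (by exact_mod_cast hl)]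
    simp only [List.foldl_cons]
    rw [stepA_eq]
    rw [show ((↑l : Int) + 1) = ((↑(l + 1) : ℕ) : Int) by push_cast; ring]
    rcases Nat.lt_or_ge l (i + mlen (lst.drop i) - 1) with hc | hc
    · -- the step leaves a best still shorter than mlen (drop i); recurse
      have hsubverif : verifegale ((lst.drop i).take (l + 1 - i)) = true := by
        rw [verif_iff_mlen, mlen_take, List.length_take, List.length_drop]
        omega
      have hsublen : ((lst.drop i).take (l + 1 - i)).length = l + 1 - i := by
        rw [List.length_take, List.length_drop]; omega
      have hgoal : ∀ b' : List Int, b'.length < mlen (lst.drop i) →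
          ifold lst ↑i (l + 1) b' = candN lst i := fun b' hb' =>
        ih (l + 1) b' (by omega) hb' (by omega)
      split
      · rename_i hcond
        exact hgoal _ (by rw [hsublen]; omega)
      · exact hgoal _ h2
    · -- l + 1 = i + mlen (drop i): this step installs the full candidate
      have heq : l + 1 - i = mlen (lst.drop i) := by omega
      rw [heq]
      have hverif : verifegale ((lst.drop i).take (mlen (lst.drop i))) = true := by
        rw [verif_iff_mlen, mlen_take, List.length_take, List.length_drop]
        omega
      have hlen : ((lst.drop i).take (mlen (lst.drop i))).length = mlen (lst.drop i) := by
        rw [List.length_take, List.length_drop]; omega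
      rw [if_pos (by rw [Bool.and_eq_true, decide_eq_true_iff, hlen]; exact ⟨hverif, h2⟩)]
      have := innerNoop lst i (lst.length) (l + 1) ((lst.drop i).take (mlen (lst.drop i)))
        (by omega) (by rw [hlen])
      unfold ifold at this
      rw [this]
      rfl

theorem innerMain (lst : List Int) (i : ℕ) (hi : i < lst.length) (b : List Int) :
    ifold lst ↑i 0 b = if b.length < mlen (lst.drop i) then candN lst i else b := by
  split
  · rename_i h
    have hne : lst.drop i ≠ [] := by simp [List.drop_eq_nil_iff]; omega
    exact innerHit lst i hi (i + mlen (lst.drop i)) 0 b (by omega) h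
      (by have := mlen_pos _ hne; omega)
  · rename_i h
    exact innerNoop lst i lst.length 0 b (by omega) (by omega)

-- ---- characterising mlen along the list ----
theorem drop_cons (lst : List Int) (t : ℕ) (h : t < lst.length) :
    lst.drop t = lst.getD t 0 :: lst.drop (t + 1) := by
  rw [List.drop_eq_getElem_cons h, List.getD_eq_getElem _ _ h]

theorem mlen_drop_short (lst : List Int) (t : ℕ) (h : lst.length ≤ t + 2) :
    mlen (lst.drop t) = lst.length - t := by
  rw [mlen_short _ (by simp; omega), List.length_drop]

theorem mlen_drop_bad (lst : List Int) (t : ℕ) (h : t + 2 < lst.length)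
    (hb : badAt lst t = true) : mlen (lst.drop t) = 2 := by
  unfold badAt at hb
  rw [drop_cons lst t (by omega), drop_cons lst (t + 1) (by omega),
      drop_cons lst (t + 2) (by omega)]
  simp only [mlen]
  rw [if_pos hb]

theorem mlen_drop_good (lst : List Int) (t : ℕ) (h : t + 2 < lst.length)
    (hb : badAt lst t = false) : mlen (lst.drop t) = mlen (lst.drop (t + 1)) + 1 := by
  unfold badAt at hb
  rw [drop_cons lst t (by omega), drop_cons lst (t + 1) (by omega),
      drop_cons lst (t + 2) (by omega)]
  simp only [mlen]
  rw [if_neg (by rw [hb]; simp)]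

theorem mlen_all_good (lst : List Int) :
    ∀ (d s : ℕ), lst.length ≤ s + 2 + d →
      (∀ t, s ≤ t → t + 2 < lst.length → badAt lst t = false) →
      mlen (lst.drop s) = lst.length - s := by
  intro d
  induction d with
  | zero => intro s h _; exact mlen_drop_short lst s (by omega)
  | succ d ih =>
    intro s h hg
    rcases Nat.lt_or_ge (s + 2) lst.length with h2 | h2
    swap
    · exact mlen_drop_short lst s h2
    · rw [mlen_drop_good lst s h2 (hg s le_rfl h2),
          ih (s + 1) (by omega) (fun t ht => hg t (by omega))]
      omega

theorem mlen_upto_bad (lst : List Int) (j : ℕ) (hj : j + 2 < lst.length)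
    (hb : badAt lst j = true) :
    ∀ (d s : ℕ), j ≤ s + d → s ≤ j →
      (∀ t, s ≤ t → t < j → badAt lst t = false) →
      mlen (lst.drop s) = j + 2 - s := by
  intro d
  induction d with
  | zero =>
    intro s h hs _
    have : s = j := by omega
    subst this
    rw [mlen_drop_bad lst s (by omega) hb]; omega
  | succ d ih =>
    intro s h hs hg
    rcases Nat.eq_or_lt_of_le hs with he | hlt
    · subst he
      rw [mlen_drop_bad lst s (by omega) hb]; omega
    · rw [mlen_drop_good lst s (by omega) (hg s le_rfl hlt),
          ih (s + 1) (by omega) (by omega) (fun t ht => hg t (by omega))]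
      omega

-- ---- B's loop ----
def z3 : List Int → List (Int × Int × Int)
  | a :: b :: c :: t => (a, b, c) :: z3 (b :: c :: t)
  | _ => []

theorem z3_eq : ∀ u : List Int, u.zip ((u.drop 1).zip (u.drop 2)) = z3 u := by
  intro u
  induction u with
  | nil => rfl
  | cons a tail ih =>
    match tail with
    | [] => rfl
    | [b] => rfl
    | b :: c :: t =>
      show ((a, b, c) :: (b :: c :: t).zip ((c :: t).zip t)) = z3 (a :: b :: c :: t)
      rw [show (c :: t).zip t = ((b :: c :: t).drop 1).zip ((b :: c :: t).drop 2) from rfl]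
      rw [ih]
      rfl

theorem z3_short (u : List Int) (h : u.length ≤ 2) : z3 u = [] := by
  match u with
  | [] => rfl
  | [a] => rfl
  | [a, b] => rfl
  | a :: b :: c :: t => simp at h

theorem stepB_eq' (st : Int × Int × Int) (i a b c : Int) :
    stepB st (i, a, b, c) =
      (if bad3 a b c then
        (if i + 2 - st.2.2 > st.2.1 then (st.2.2, i + 2 - st.2.2, i + 1)
         else (st.1, st.2.1, i + 1))
       else st) := rfl

def bfin (lst : List Int) (st : Int × Int × Int) : List Int :=
  let fin := if PySem.List.len lst - st.2.2 > st.2.1 then (st.2.2, PySem.List.len lst - st.2.2)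
             else (st.1, st.2.1)
  PySem.List.slice lst (some fin.1) (some (fin.1 + fin.2))

theorem bfin_pos (lst : List Int) (st : Int × Int × Int)
    (h : PySem.List.len lst - st.2.2 > st.2.1) :
    bfin lst st =
      PySem.List.slice lst (some st.2.2) (some (st.2.2 + (PySem.List.len lst - st.2.2))) := by
  simp only [bfin]
  rw [if_pos h]

theorem bfin_neg (lst : List Int) (st : Int × Int × Int)
    (h : ¬ PySem.List.len lst - st.2.2 > st.2.1) :
    bfin lst st = PySem.List.slice lst (some st.1) (some (st.1 + st.2.1)) := by
  simp only [bfin]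
  rw [if_neg h]

theorem BL_base (lst : List Int) (p bsn bln sn : ℕ) (hshort : lst.length ≤ p + 2)
    (hbs : bsn + bln ≤ lst.length) (_hsp : sn ≤ p) (hsn : sn ≤ lst.length)
    (hg : ∀ t, sn ≤ t → t < p → badAt lst t = false) :
    bfin lst ((PySem.List.enumerate (z3 (lst.drop p)) ↑p).foldl stepB (↑bsn, ↑bln, ↑sn))
      = afold lst sn ((lst.drop bsn).take bln) := by
  rw [z3_short (lst.drop p) (by rw [List.length_drop]; omega), PySem.List.enumerate_nil,
      List.foldl_nil]
  have hM : mlen (lst.drop sn) = lst.length - sn :=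
    mlen_all_good lst lst.length sn (by omega) (fun t ht1 ht2 => hg t ht1 (by omega))
  have hblen : ((lst.drop bsn).take bln).length = bln := by
    rw [List.length_take, List.length_drop]; omega
  rcases Nat.lt_or_ge bln (lst.length - sn) with hcmp | hcmp
  · rw [bfin_pos lst _ (by simp only [PySem.List.len_eq]; omega)]
    simp only [PySem.List.len_eq]
    rw [show ((↑sn : Int) + ((↑lst.length : Int) - ↑sn)) = ((lst.length : ℕ) : Int) from by
          ring]
    rw [PySem.List.slice_natCast]
    have hsltn : sn < lst.length := by omega
    rw [afold_step lst sn _ hsltn, hblen, hM, if_pos hcmp]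
    have hseg := outSeg lst (lst.length - (sn + 1)) (sn + 1) (candN lst sn) (by omega)
      (fun t ht1 ht2 => by
        have h1 := mlen_le (lst.drop t)
        rw [List.length_drop] at h1
        rw [candN_length, hM]
        omega)
    rw [hseg, afold_nil lst _ _ (by omega)]
    unfold candN
    rw [hM]
  · rw [bfin_neg lst _ (by simp only [PySem.List.len_eq]; omega)]
    rw [PySem.List.slice_natCast_add]
    have hseg := outSeg lst (lst.length - sn) sn ((lst.drop bsn).take bln) (by omega)
      (fun t ht1 ht2 => by
        have h1 := mlen_le (lst.drop t)
        rw [List.length_drop] at h1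
        rw [hblen]
        omega)
    rw [hseg, afold_nil lst _ _ (by omega)]

theorem BL (lst : List Int) :
    ∀ (d p bsn bln sn : ℕ), lst.length ≤ p + d → bsn + bln ≤ lst.length →
      sn ≤ p → sn ≤ lst.length →
      (∀ t, sn ≤ t → t < p → badAt lst t = false) →
      bfin lst ((PySem.List.enumerate (z3 (lst.drop p)) ↑p).foldl stepB (↑bsn, ↑bln, ↑sn))
        = afold lst sn ((lst.drop bsn).take bln) := by
  intro d
  induction d with
  | zero =>
    intro p bsn bln sn hd hbs hsp hsn hg
    exact BL_base lst p bsn bln sn (by omega) hbs hsp hsn hg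
  | succ d ih =>
    intro p bsn bln sn hd hbs hsp hsn hg
    rcases Nat.lt_or_ge (p + 2) lst.length with hlong | hshort
    swap
    · exact BL_base lst p bsn bln sn hshort hbs hsp hsn hg
    · -- lst.drop p = getD p :: getD (p+1) :: getD (p+2) :: drop (p+3)
      have hdrop : lst.drop p = lst.getD p 0 :: lst.getD (p + 1) 0 :: lst.getD (p + 2) 0 :: lst.drop (p + 3) := by
        rw [drop_cons lst p (by omega), drop_cons lst (p + 1) (by omega),
            drop_cons lst (p + 2) (by omega)]
      have hdrop1 : lst.drop (p + 1) = lst.getD (p + 1) 0 :: lst.getD (p + 2) 0 :: lst.drop (p + 3) := by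
        rw [drop_cons lst (p + 1) (by omega), drop_cons lst (p + 2) (by omega)]
      rw [hdrop]
      rw [show z3 (lst.getD p 0 :: lst.getD (p + 1) 0 :: lst.getD (p + 2) 0 :: lst.drop (p + 3)) =
            (lst.getD p 0, lst.getD (p + 1) 0, lst.getD (p + 2) 0) ::
              z3 (lst.getD (p + 1) 0 :: lst.getD (p + 2) 0 :: lst.drop (p + 3)) from rfl]
      rw [← hdrop1, PySem.List.enumerate_cons, List.foldl_cons, stepB_eq']
      cases hbad : badAt lst p
      case false =>
        -- good triple: state unchanged
        rw [if_neg (by unfold badAt at hbad; rw [hbad]; simp)]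
        rw [show ((↑p : Int) + 1) = ((↑(p + 1) : ℕ) : Int) from by push_cast; ring]
        have hg' : ∀ t, sn ≤ t → t < p + 1 → badAt lst t = false := by
          intro t ht1 ht2
          rcases Nat.lt_or_ge t p with h | h
          · exact hg t ht1 h
          · have : t = p := by omega
            subst this; exact hbad
        exact ih (p + 1) bsn bln sn (by omega) hbs (by omega) hsn hg'
      case true =>
        -- bad triple at p
        rw [if_pos (by unfold badAt at hbad; rw [hbad])]
        have hM : mlen (lst.drop sn) = p + 2 - sn :=
          mlen_upto_bad lst p (by omega) hbad (p - sn) sn (by omega) hsp hg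
        have hblen : ((lst.drop bsn).take bln).length = bln := by
          rw [List.length_take, List.length_drop]; omega
        -- A's pass from sn to p+1 produces the updated best
        have hA : afold lst sn ((lst.drop bsn).take bln) =
            afold lst (p + 1)
              (if bln < p + 2 - sn then candN lst sn else (lst.drop bsn).take bln) := by
          rw [afold_step lst sn _ (by omega)]
          rw [hblen, hM]
          set b' := if bln < p + 2 - sn then candN lst sn else (lst.drop bsn).take bln with hb'
          have hb'len : p + 2 - sn ≤ b'.length ∨ b' = (lst.drop bsn).take bln ∧ ¬ bln < p + 2 - sn := by
            rw [hb']; split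
            · left; rw [candN_length, hM]
            · right; exact ⟨rfl, by assumption⟩
          have hlen' : p + 2 - (sn + 1) ≤ b'.length := by
            rcases hb'len with h | ⟨he, hn⟩
            · omega
            · rw [he, hblen]; omega
          have := outSeg lst (p + 1 - (sn + 1)) (sn + 1) b' (by omega)
            (fun t ht1 ht2 => by
              have : mlen (lst.drop t) = p + 2 - t :=
                mlen_upto_bad lst p (by omega) hbad (p - t) t (by omega) (by omega)
                  (fun u hu1 hu2 => hg u (by omega) hu2)
              omega)
          rw [this]
          congr 1
          omega
        rw [hA]
        -- B's new state, in Nat-cast form, then the induction hypothesis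
        rcases Nat.lt_or_ge bln (p + 2 - sn) with hcmp | hcmp
        · rw [if_pos (by push_cast; omega)]
          rw [if_pos hcmp]
          rw [show ((↑p : Int) + 2 - ↑sn) = ((↑(p + 2 - sn) : ℕ) : Int) from by omega,
              show ((↑p : Int) + 1) = ((↑(p + 1) : ℕ) : Int) from by push_cast; ring]
          have := ih (p + 1) sn (p + 2 - sn) (p + 1) (by omega) (by omega) le_rfl (by omega)
            (fun t ht1 ht2 => (by omega : False).elim)
          rw [this]
          congr 1
          rw [← hM]; rfl
        · rw [if_neg (by push_cast; omega)]
          rw [if_neg (by omega)]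
          rw [show ((↑p : Int) + 1) = ((↑(p + 1) : ℕ) : Int) from by push_cast; ring]
          exact ih (p + 1) bsn bln (p + 1) (by omega) hbs le_rfl (by omega)
            (fun t ht1 ht2 => (by omega : False).elim)

theorem guardA_eq (lst : List Int) :
    ((sir_crescator lst == true) || (sir_descrescator lst == true)) = (ascAll lst || descAll lst) := by
  rw [cresc_eq, descresc_eq]
  cases ascAll lst <;> cases descAll lst <;> rfl

theorem zipB_eq (lst : List Int) :
    lst.zip ((PySem.List.slice lst (some 1) none).zip (PySem.List.slice lst (some 2) none)) = z3 lst := by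
  have h2 : PySem.List.slice lst (some 2) none = lst.drop 2 := by
    rw [show (2 : Int) = ((2 : ℕ) : Int) from by norm_num, PySem.List.slice_from_natCast]
  rw [PySem.List.slice_from_one, h2, ← List.drop_one]
  exact z3_eq lst

theorem A_fold_eq (lst : List Int) :
    (PySem.List.pyRange 0 (PySem.List.len lst) 1).foldl
      (fun best i => (PySem.List.pyRange 0 (PySem.List.len lst) 1).foldl (stepA lst i) best)
      ([] : List Int)
    = afold lst 0 [] := by
  have hme : ∀ (acc : List Int) (x : Int), x ∈ PySem.List.pyRange 0 (PySem.List.len lst) 1 →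
      (PySem.List.pyRange 0 (PySem.List.len lst) 1).foldl (stepA lst x) acc =
        (if acc.length < mlen (lst.drop x.toNat) then candN lst x.toNat else acc) := by
    intro acc x hx
    rw [PySem.List.mem_pyRange_one] at hx
    simp only [PySem.List.len_eq] at hx
    obtain ⟨k, rfl⟩ : ∃ k : ℕ, x = ↑k := ⟨x.toNat, by omega⟩
    have hlt : k < lst.length := by exact_mod_cast hx.2
    have h2 := innerMain lst k hlt acc
    unfold ifold at h2
    simp only [Int.toNat_natCast]
    rw [PySem.List.len_eq]
    exact_mod_cast h2
  have hcg := PySem.List.foldl_congr_mem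
    (l := PySem.List.pyRange 0 (PySem.List.len lst) 1)
    (f := fun best i => (PySem.List.pyRange 0 (PySem.List.len lst) 1).foldl (stepA lst i) best)
    (g := fun (acc : List Int) (x : Int) =>
      if acc.length < mlen (lst.drop x.toNat) then candN lst x.toNat else acc)
    (init := ([] : List Int)) hme
  rw [hcg, PySem.List.len_eq]
  rfl

-- ===== VERDICT (by name: the statement is the Claim_ definition above) =====
theorem cea_mai_lunga_nr_consec_spec : Claim_equal_cea_mai_lunga_nr_consec := by
  intro lst _
  unfold Spec_cea_mai_lunga_nr_consec
  unfold cea_mai_lunga_nr_consec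
  simp only [cea_mai_lunga_nr_consec_alt]
  rw [guardA_eq, zipB_eq]
  by_cases hg : (ascAll lst || descAll lst) = true
  · rw [if_pos hg, if_pos hg]
  · rw [if_neg hg, if_neg hg]
    rw [A_fold_eq]
    have hbl := BL lst lst.length 0 0 0 0 (by omega) (by omega) le_rfl (Nat.zero_le _)
      (fun t ht1 ht2 => (by omega : False).elim)
    simp only [List.drop_zero, List.take_zero, Nat.cast_zero] at hbl
    rw [← hbl]
    rfl
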